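-- pv_equiv track=rewrite | github.com/BioGeek/SchaakStudieSpinsels2 | scripts/study_extractor.py | chapter_for
-- ===== SOURCE A (Python) =====
-- CHAPTERS: list[tuple[int, str, int]] = [
--     (1, "Manke Maljutka's", 34),
--     (2, "Maljutka's", 66),
--     (3, "Mini - Studies", 120),
--     (4, "Miniaturen", 206),
--     (5, "Bijna - Miniaturen", 294),
--     (6, "Studies", 354),
-- ]
--
-- def chapter_for(page: int) -> tuple[int, str]:
--     """Return (chapter_num, chapter_name) for a given 0-based page index."""
--     selected = (0, "(front matter)")
--     for num, name, start_page in CHAPTERS: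
--         if page >= start_page:
--             selected = (num, name)
--         else:
--             break
--     return selected
-- ===== SOURCE B (Python) =====
-- CHAPTERS: list[tuple[int, str, int]] = [
--     (1, "Manke Maljutka's", 34),
--     (2, "Maljutka's", 66),
--     (3, "Mini - Studies", 120),
--     (4, "Miniaturen", 206),
--     (5, "Bijna - Miniaturen", 294),
--     (6, "Studies", 354),
-- ]
--
-- _STARTS = [c[2] for c in CHAPTERS]
--
-- def chapter_for(page: int) -> tuple[int, str]:
--     """Return (chapter_num, chapter_name) for a given 0-based page index."""
--     # binary search: rightmost insertion point of `page` in the sorted start pages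
--     lo, hi = 0, len(_STARTS)
--     while lo < hi:
--         mid = (lo + hi) // 2
--         if page < _STARTS[mid]:
--             hi = mid
--         else:
--             lo = mid + 1
--     if lo == 0:
--         return (0, "(front matter)")
--     num, name, _ = CHAPTERS[lo - 1]
--     return (num, name)
-- ===== Notes on version B (the rewrite author's own statement) =====
-- stated objective: alternative
-- what changed: Replaced the linear accumulate-and-break scan over CHAPTERS with a hand-written binary search (bisect_right) over the precomputed sorted list of chapter start pages, indexing the chapter table once.
import Mathlib
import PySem

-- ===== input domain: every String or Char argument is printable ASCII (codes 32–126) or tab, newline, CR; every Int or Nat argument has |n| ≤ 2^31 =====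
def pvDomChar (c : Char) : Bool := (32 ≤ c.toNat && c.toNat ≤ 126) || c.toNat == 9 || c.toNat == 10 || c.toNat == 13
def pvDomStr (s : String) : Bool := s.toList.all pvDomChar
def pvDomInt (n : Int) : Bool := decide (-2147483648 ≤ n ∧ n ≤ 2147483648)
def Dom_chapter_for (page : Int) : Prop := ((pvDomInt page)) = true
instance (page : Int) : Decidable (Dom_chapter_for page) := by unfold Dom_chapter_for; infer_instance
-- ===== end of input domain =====

-- B replaces A's linear accumulate-and-break scan of CHAPTERS with a binary search
-- (bisect_right) over the precomputed sorted start pages (alternative algorithm).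


-- ===== PORT A =====
def CHAPTERS : List (Int × String × Int) :=
  [ (1, "Manke Maljutka's", 34),
    (2, "Maljutka's", 66),
    (3, "Mini - Studies", 120),
    (4, "Miniaturen", 206),
    (5, "Bijna - Miniaturen", 294),
    (6, "Studies", 354) ]

-- the for-loop with break, as structural recursion over CHAPTERS carrying `selected`
def chapterLoop (page : Int) : List (Int × String × Int) → Int × String → Int × String
  | [], sel => sel
  | (num, name, startPage) :: rest, sel =>
      if page ≥ startPage then chapterLoop page rest (num, name) else sel

def chapter_for (page : Int) : Int × String :=
  chapterLoop page CHAPTERS (0, "(front matter)")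

-- ===== PORT B =====
def altStarts : List Int := CHAPTERS.map (fun c => c.2.2)

-- the hand-written bisect_right while-loop of Source B, recursion on hi - lo
def altBisect (page : Int) (lo hi : Nat) : Nat :=
  if _h : lo < hi then
    let mid := (lo + hi) / 2
    if page < altStarts.getD mid 0 then altBisect page lo mid
    else altBisect page (mid + 1) hi
  else lo
termination_by hi - lo
decreasing_by all_goals omega

def chapter_for_alt (page : Int) : Int × String :=
  let lo := altBisect page 0 altStarts.length
  if lo = 0 then (0, "(front matter)")
  else
    let c := CHAPTERS.getD (lo - 1) (0, "", 0)
    (c.1, c.2.1)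

-- ===== PRECONDITION & SPEC =====
def Spec_chapter_for (page : Int) (out : Int × String) : Prop := out = chapter_for_alt page
instance (page : Int) (out : Int × String) : Decidable (Spec_chapter_for page out) := by unfold Spec_chapter_for; infer_instance

-- ===== CLAIM (what is proved, stated in full; the proofs are below) =====
def Claim_equal_chapter_for : Prop := ∀ (page : Int), Dom_chapter_for page → Spec_chapter_for page (chapter_for page)

-- ===== LEMMAS AND PROOFS =====

-- ===== VERDICT (by name: the statement is the Claim_ definition above) =====
theorem chapter_for_spec : Claim_equal_chapter_for := by
  intro page _
  unfold Spec_chapter_for chapter_for chapter_for_alt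
  by_cases h1 : page < 34
  all_goals by_cases h2 : page < 66
  all_goals by_cases h3 : page < 120
  all_goals by_cases h4 : page < 206
  all_goals by_cases h5 : page < 294
  all_goals by_cases h6 : page < 354
  all_goals first
    | omega
    | (simp [chapterLoop, CHAPTERS, altBisect, altStarts, h1, h2, h3, h4, h5, h6]
       all_goals (split_ifs <;> first | rfl | omega))
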